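-- pv_equiv track=rewrite | github.com/nivbhaskhar/MaximumMatching | maximum_matching.py | find_even_path
-- ===== SOURCE A (Python) =====
-- def find_even_path(node, blossom_cycle):
--      #blossom_cycle = [(lca, v_1), (v_1, v_2), ..... (v_2n, lca)]
--      #              = [unmatched, matched, unmatched,.......matched, unmatched]
--      count = 0
--      path = []
--      while(blossom_cycle[count][0]!= node):
--           path.append((blossom_cycle[count][1],blossom_cycle[count][0]))
--           count +=1
--      if (count % 2) == 0:
--           return list(reversed(path))
--      else:
--           return blossom_cycle[count:]
-- ===== SOURCE B (Python) =====
-- def _go(node, cycle, even):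
--     # recursion over the cycle; IndexError on empty matches A's missing-node behaviour
--     u, v = cycle[0]
--     if u == node:
--         return (even, [] if even else cycle)
--     tag, res = _go(node, cycle[1:], not even)
--     return (tag, res + [(v, u)] if tag else res)
--
-- def find_even_path(node, blossom_cycle):
--     # structural recursion with a tagged return: the even-index swapped prefix is
--     # assembled back-to-front on the unwind; the odd-index suffix is passed up as-is
--     return _go(node, blossom_cycle, True)[1]
-- ===== Notes on version B (the rewrite author's own statement) =====
-- stated objective: alternative
-- what changed: B replaces A's iterative fused search-and-build loop (forward accumulator + final reverse/slice) with a structural recursion carrying a parity flag and a tagged return: the even-index swapped prefix is assembled back-to-front on the recursion's unwind, and the odd-index suffix is passed up unchanged, so no accumulator, no reversal and no slicing occur.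
import Mathlib
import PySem

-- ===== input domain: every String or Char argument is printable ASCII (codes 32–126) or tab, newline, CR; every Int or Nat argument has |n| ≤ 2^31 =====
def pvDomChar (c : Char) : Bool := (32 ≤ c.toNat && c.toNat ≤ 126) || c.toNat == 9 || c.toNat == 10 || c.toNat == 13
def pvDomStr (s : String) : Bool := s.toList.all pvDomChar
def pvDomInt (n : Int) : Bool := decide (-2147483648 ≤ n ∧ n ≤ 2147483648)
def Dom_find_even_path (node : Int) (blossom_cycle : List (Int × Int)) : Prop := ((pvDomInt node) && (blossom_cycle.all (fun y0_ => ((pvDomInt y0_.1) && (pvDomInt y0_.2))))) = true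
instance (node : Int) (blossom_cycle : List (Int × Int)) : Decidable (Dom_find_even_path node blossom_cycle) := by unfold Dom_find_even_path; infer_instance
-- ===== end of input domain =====

-- B replaces A's fused search-and-build loop with a parity-flagged structural
-- recursion whose tagged return builds the result on the unwind (alternative decomposition).


-- ===== PORT A =====
-- A's while loop: walks the cycle, appending the swapped edge and incrementing count
-- until blossom_cycle[count][0] == node; then returns reversed(path) (count even)
-- or blossom_cycle[count:] (count odd). The [] case is the IndexError (outside Pre_).
def findEvenPathLoop (node : Int) (orig : List (Int × Int)) :
    List (Int × Int) → List (Int × Int) → Nat → List (Int × Int)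
  | [], _, _ => []
  | (u, v) :: rest, path, count =>
      if u ≠ node then
        findEvenPathLoop node orig rest (path ++ [(v, u)]) (count + 1)
      else
        if count % 2 = 0 then path.reverse else orig.drop count

def find_even_path (node : Int) (blossom_cycle : List (Int × Int)) : List (Int × Int) :=
  findEvenPathLoop node blossom_cycle blossom_cycle [] 0

-- ===== PORT B =====
-- B's recursion _go: on an empty cycle Python raises IndexError (outside Pre_);
-- otherwise it recurses with the parity flipped and, when the found index was even,
-- appends the swapped head edge on the unwind.
def goB (node : Int) : List (Int × Int) → Bool → Bool × List (Int × Int)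
  | [], even => (even, [])
  | (u, v) :: rest, even =>
      if u = node then (even, if even then [] else (u, v) :: rest)
      else
        let r := goB node rest (!even)
        (r.1, if r.1 then r.2 ++ [(v, u)] else r.2)

def find_even_path_alt (node : Int) (blossom_cycle : List (Int × Int)) : List (Int × Int) :=
  (goB node blossom_cycle true).2

-- ===== PRECONDITION & SPEC =====
-- Pre_ excludes exactly the inputs where Python A raises IndexError: node never
-- occurs as a first component of the cycle.
def Pre_find_even_path (node : Int) (blossom_cycle : List (Int × Int)) : Prop :=
  node ∈ blossom_cycle.map Prod.fst
instance (node : Int) (blossom_cycle : List (Int × Int)) : Decidable (Pre_find_even_path node blossom_cycle) := by unfold Pre_find_even_path; infer_instance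
def pvWitness_find_even_path : Int × (List (Int × Int)) := (3, [(1, 2), (2, 3), (3, 1)])

def Spec_find_even_path (node : Int) (blossom_cycle : List (Int × Int)) (out : List (Int × Int)) : Prop := out = find_even_path_alt node blossom_cycle
instance (node : Int) (blossom_cycle : List (Int × Int)) (out : List (Int × Int)) : Decidable (Spec_find_even_path node blossom_cycle out) := by unfold Spec_find_even_path; infer_instance

-- ===== CLAIM (what is proved, stated in full; the proofs are below) =====
def Claim_equal_find_even_path : Prop := ∀ (node : Int) (blossom_cycle : List (Int × Int)), Dom_find_even_path node blossom_cycle → Pre_find_even_path node blossom_cycle → Spec_find_even_path node blossom_cycle (find_even_path node blossom_cycle)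

-- ===== LEMMAS AND PROOFS =====

theorem loop_eq_goB (node : Int) (orig : List (Int × Int)) :
    ∀ (l path : List (Int × Int)) (c : Nat),
      node ∈ l.map Prod.fst →
      l = orig.drop c →
      findEvenPathLoop node orig l path c =
        (if (goB node l (decide (c % 2 = 0))).1
         then (goB node l (decide (c % 2 = 0))).2 ++ path.reverse
         else (goB node l (decide (c % 2 = 0))).2) := by
  intro l
  induction l with
  | nil => intro path c h _; simp at h
  | cons hd tl ih =>
      intro path c h hdrop
      obtain ⟨u, v⟩ := hd
      by_cases hu : u = node
      · by_cases hc : c % 2 = 0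
        · simp [findEvenPathLoop, goB, hu, hc]
        · simp [findEvenPathLoop, goB, hu, hc, ← hdrop]
      · have hmem : node ∈ tl.map Prod.fst := by
          simp at h
          rcases h with h | h
          · exact absurd h.symm hu
          · simpa using h
        have hdrop' : tl = orig.drop (c + 1) := by
          have hstep : orig.drop (c + 1) = (orig.drop c).tail := by
            rw [← List.drop_drop]
            simp
          rw [hstep, ← hdrop]
          rfl
        have hpar : decide ((c + 1) % 2 = 0) = !decide (c % 2 = 0) := by
          have hiff : (c + 1) % 2 = 0 ↔ ¬ (c % 2 = 0) := by omega
          rw [decide_eq_decide.mpr hiff, decide_not]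
        simp only [findEvenPathLoop, goB, hu, ne_eq, not_false_eq_true, if_true, if_false]
        rw [ih (path ++ [(v, u)]) (c + 1) hmem hdrop', hpar]
        cases hb : (goB node tl (!decide (c % 2 = 0))).1 <;> simp [List.append_assoc]

theorem find_even_path_eq (node : Int) (blossom_cycle : List (Int × Int))
    (h : node ∈ blossom_cycle.map Prod.fst) :
    find_even_path node blossom_cycle = find_even_path_alt node blossom_cycle := by
  unfold find_even_path find_even_path_alt
  rw [loop_eq_goB node blossom_cycle blossom_cycle [] 0 h (by simp)]
  simp

-- ===== VERDICT (by name: the statement is the Claim_ definition above) =====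
theorem find_even_path_spec : Claim_equal_find_even_path := by
  intro node bc _ hpre
  unfold Spec_find_even_path
  exact find_even_path_eq node bc hpre
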